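-- pv_equiv track=rewrite | github.com/sshh12/SchoolCode | Algorithms/Backtracking/ValidSnake.py | is_valid_snake
-- ===== SOURCE A (Python) =====
-- def is_valid_snake(grid):
--
--     snake_points = set()
--
--     for r in range(len(grid)):
--
--         for c in range(len(grid[r])):
--
--             if grid[r][c] == 'S':
--
--                 snake_points.add((r, c))
--
--     for start_point in snake_points:
--
--         if recur(grid, snake_points, start_point, set()):
--
--             return True
--
--     return False
--
-- def recur(grid, snake_points, cur, visited):
--
--     visited.add(cur)
--
--     if len(visited) == len(snake_points):
--
--         return True
--
--     else:
--
--         next_points = []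
--
--         r, c = cur
--         for rr, cc in [[r + 1, c], [r - 1, c], [r, c + 1], [r, c - 1]]:
--
--             if (rr, cc) in snake_points and (rr, cc) not in visited:
--
--                 next_points.append((rr, cc))
--
--         if len(next_points) == 0:
--
--             return False
--
--         else:
--
--             for next_point in next_points:
--
--                 if recur(grid, snake_points, next_point, visited):
--
--                     return True
--
--                 visited.remove(next_point)
--
--             return False
-- ===== SOURCE B (Python) =====
-- def is_valid_snake(grid):
--     # Iterative worklist search: seed one state per 'S' cell and pop states
--     # (endpoint, remaining-cells) from an explicit stack; a state with nothing
--     # remaining means a Hamiltonian path was completed.  No recursion, no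
--     # visited set (the complement "remaining" is tracked instead).
--     points = [(r, c) for r, row in enumerate(grid)
--               for c, ch in enumerate(row) if ch == 'S']
--     cells = set(points)
--     stack = [(p, cells - {p}) for p in points]
--     while stack:
--         (r, c), rem = stack.pop()
--         if not rem:
--             return True
--         for nb in ((r + 1, c), (r - 1, c), (r, c + 1), (r, c - 1)):
--             if nb in rem:
--                 stack.append((nb, rem - {nb}))
--     return False
-- ===== Notes on version B (the rewrite author's own statement) =====
-- stated objective: alternative
-- what changed: B replaces A's per-start recursive backtracking (mutable visited set, helper function, early returns) by a single non-recursive worklist search: one explicit stack of (endpoint, remaining-cells) states seeded with every 'S' cell, popping states and pushing neighbor extensions until a state with no remaining cells is found; the visited set is replaced by its complement.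
import Mathlib
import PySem

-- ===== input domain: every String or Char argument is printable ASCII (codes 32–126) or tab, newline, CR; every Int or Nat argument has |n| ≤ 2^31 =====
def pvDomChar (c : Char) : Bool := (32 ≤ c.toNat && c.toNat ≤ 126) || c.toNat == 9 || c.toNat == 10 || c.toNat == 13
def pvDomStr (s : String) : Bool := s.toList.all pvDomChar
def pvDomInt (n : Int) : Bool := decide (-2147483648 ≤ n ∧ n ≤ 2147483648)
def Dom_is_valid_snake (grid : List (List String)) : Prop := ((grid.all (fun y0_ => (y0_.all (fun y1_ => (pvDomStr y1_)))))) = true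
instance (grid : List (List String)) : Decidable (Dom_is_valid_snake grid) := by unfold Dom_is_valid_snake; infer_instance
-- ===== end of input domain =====

-- B replaces A's recursive per-start backtracking by a single iterative worklist
-- search over (endpoint, remaining-cells) states (objective: alternative).

-- ===== PORT A =====
-- Python A mutates `visited`; a failed recursive call leaves `visited` exactly as it
-- found it (it adds only `cur`, which the caller's `visited.remove(next_point)` takes
-- back out), so the mutation is modeled by passing `visited ∪ {cur}` to each child.
-- The for-loop over next_points with early `return True` / final `return False` is
-- `List.any`.  Recursion depth is bounded by |snake_points| (`visited` grows by one at
-- every call and the length test stops at |snake_points|), used as fuel; the fuel-0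
-- branch is never reached from `is_valid_snake`.
def pvSnakePoints (grid : List (List String)) : PySem.Set (Int × Int) :=
  (PySem.List.pyRange 0 grid.length 1).foldl (fun s r =>
    (PySem.List.pyRange 0 (PySem.List.pyGetD grid r []).length 1).foldl (fun s c =>
      if PySem.List.pyGetD (PySem.List.pyGetD grid r []) c "" == "S"
      then PySem.Set.add s (r, c) else s) s) PySem.Set.empty

def pvRecur (snake : PySem.Set (Int × Int)) :
    Nat → (Int × Int) → PySem.Set (Int × Int) → Bool
  | 0, _, _ => false
  | f + 1, cur, visited =>
    let visited := PySem.Set.add visited cur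
    if PySem.Set.len visited == PySem.Set.len snake then true
    else
      let next_points :=
        [(cur.1 + 1, cur.2), (cur.1 - 1, cur.2), (cur.1, cur.2 + 1), (cur.1, cur.2 - 1)].foldl
          (fun acc p =>
            if PySem.Set.contains snake p && !(PySem.Set.contains visited p)
            then acc ++ [p] else acc) []
      if next_points.length == 0 then false
      else next_points.any (fun p => pvRecur snake f p visited)

def is_valid_snake (grid : List (List String)) : Bool :=
  let snake := pvSnakePoints grid
  -- the loop over the set `snake_points` is an order-insensitive boolean `any`
  snake.any (fun p => pvRecur snake snake.length p PySem.Set.empty)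

-- ===== PORT B =====
def pvCollect (grid : List (List String)) : List (Int × Int) :=
  (PySem.List.enumerate grid).flatMap (fun rp =>
    ((PySem.List.enumerate rp.2).filter (fun cp => cp.2 == "S")).map
      (fun cp => (rp.1, cp.1)))

-- termination measure of the worklist loop (cited by pvRun's decreasing_by)
def pvStackMeasure (st : List ((Int × Int) × PySem.Set (Int × Int))) : Nat :=
  (st.map (fun q => 5 ^ q.2.length)).sum

lemma pvMeasure_foldl (rem : PySem.Set (Int × Int)) (dirs : List (Int × Int))
    (st : List ((Int × Int) × PySem.Set (Int × Int))) :
    pvStackMeasure (dirs.foldl (fun s nb =>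
        if PySem.Set.contains rem nb then (nb, PySem.Set.diff rem [nb]) :: s else s) st)
      ≤ pvStackMeasure st + dirs.length * 5 ^ (rem.length - 1) := by
  induction dirs generalizing st with
  | nil => simp [pvStackMeasure]
  | cons d ds ih =>
    simp only [List.foldl_cons, List.length_cons]
    refine (ih _).trans ?_
    have hstep : pvStackMeasure (if PySem.Set.contains rem d
          then (d, PySem.Set.diff rem [d]) :: st else st)
        ≤ pvStackMeasure st + 5 ^ (rem.length - 1) := by
      by_cases h : PySem.Set.contains rem d
      · have hd : d ∈ rem := (PySem.Set.contains_iff rem d).1 h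
        have hlt : (PySem.Set.diff rem [d]).length < rem.length := by
          simp only [PySem.Set.diff]
          exact List.length_filter_lt_length_iff_exists.2
            ⟨d, hd, by simp [PySem.Set.contains]⟩
        have hle : 5 ^ (PySem.Set.diff rem [d]).length ≤ 5 ^ (rem.length - 1) :=
          Nat.pow_le_pow_right (by norm_num) (by omega)
        simp only [h, if_true, pvStackMeasure, List.map_cons, List.sum_cons]
        omega
      · rw [if_neg h]
        exact Nat.le_add_right _ _
    have : ds.length * 5 ^ (rem.length - 1) + 5 ^ (rem.length - 1)
        = (ds.length + 1) * 5 ^ (rem.length - 1) := by ring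
    omega

-- The Python while-loop pops from the END of `stack`; the port keeps the stack
-- head-on-top (pop = head, append = cons), so the initial comprehension is reversed.
def pvRun : List ((Int × Int) × PySem.Set (Int × Int)) → Bool
  | [] => false
  | (cur, rem) :: st =>
    if rem.isEmpty then true
    else
      pvRun ([(cur.1 + 1, cur.2), (cur.1 - 1, cur.2), (cur.1, cur.2 + 1), (cur.1, cur.2 - 1)].foldl
        (fun s nb => if PySem.Set.contains rem nb then (nb, PySem.Set.diff rem [nb]) :: s else s) st)
termination_by st => pvStackMeasure st
decreasing_by
  rename_i h
  have h1 : rem.length ≠ 0 := by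
    simpa [List.isEmpty_iff_length_eq_zero] using h
  have hf := pvMeasure_foldl rem
    [(cur.1 + 1, cur.2), (cur.1 - 1, cur.2), (cur.1, cur.2 + 1), (cur.1, cur.2 - 1)] st
  have h5 : 4 * 5 ^ (rem.length - 1) < 5 ^ rem.length := by
    have hp : 0 < 5 ^ (rem.length - 1) := Nat.pow_pos (by norm_num)
    have he : rem.length - 1 + 1 = rem.length := by omega
    calc 4 * 5 ^ (rem.length - 1) < 5 ^ (rem.length - 1) * 5 := by omega
      _ = 5 ^ (rem.length - 1 + 1) := (pow_succ 5 _).symm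
      _ = 5 ^ rem.length := by rw [he]
  simp only [List.length_cons, List.length_nil] at hf
  simp only [pvStackMeasure, List.map_cons, List.sum_cons] at hf ⊢
  simp only [dite_eq_ite]
  omega

def is_valid_snake_alt (grid : List (List String)) : Bool :=
  let points := pvCollect grid
  let cells := PySem.Set.ofList points
  pvRun ((points.map (fun p => (p, PySem.Set.diff cells [p]))).reverse)

-- ===== PRECONDITION & SPEC =====
def Spec_is_valid_snake (grid : List (List String)) (out : Bool) : Prop := out = is_valid_snake_alt grid
instance (grid : List (List String)) (out : Bool) : Decidable (Spec_is_valid_snake grid out) := by unfold Spec_is_valid_snake; infer_instance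

-- ===== CLAIM (what is proved, stated in full; the proofs are below) =====
def Claim_equal_is_valid_snake : Prop := ∀ (grid : List (List String)), Dom_is_valid_snake grid → Spec_is_valid_snake grid (is_valid_snake grid)

-- ===== LEMMAS AND PROOFS =====

-- both searches decide the same extension problem: "from endpoint `cur`, can the
-- cells of `rem` be appended one adjacent step at a time until none remain?"
def pvExt (cur : Int × Int) (rem : PySem.Set (Int × Int)) : Bool :=
  if rem.isEmpty then true
  else
    (if h : PySem.Set.contains rem (cur.1 + 1, cur.2) then
        pvExt (cur.1 + 1, cur.2) (PySem.Set.diff rem [(cur.1 + 1, cur.2)]) else false)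
    || (if h : PySem.Set.contains rem (cur.1 - 1, cur.2) then
        pvExt (cur.1 - 1, cur.2) (PySem.Set.diff rem [(cur.1 - 1, cur.2)]) else false)
    || (if h : PySem.Set.contains rem (cur.1, cur.2 + 1) then
        pvExt (cur.1, cur.2 + 1) (PySem.Set.diff rem [(cur.1, cur.2 + 1)]) else false)
    || (if h : PySem.Set.contains rem (cur.1, cur.2 - 1) then
        pvExt (cur.1, cur.2 - 1) (PySem.Set.diff rem [(cur.1, cur.2 - 1)]) else false)
termination_by rem.length
decreasing_by
  all_goals
    simp only [PySem.Set.diff]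
    exact List.length_filter_lt_length_iff_exists.2
      ⟨_, (PySem.Set.contains_iff rem _).1 h, by simp [PySem.Set.contains]⟩

lemma pvDiteAnd (c e : Bool) : (if _h : c then e else false) = (c && e) := by
  cases c <;> simp

lemma pvExt_eq_any (cur : Int × Int) (rem : PySem.Set (Int × Int)) (h : rem.isEmpty = false) :
    pvExt cur rem
      = [(cur.1 + 1, cur.2), (cur.1 - 1, cur.2), (cur.1, cur.2 + 1), (cur.1, cur.2 - 1)].any
          (fun nb => PySem.Set.contains rem nb && pvExt nb (PySem.Set.diff rem [nb])) := by
  rw [pvExt]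
  simp only [h, Bool.false_eq_true, if_false, pvDiteAnd, List.any_cons, List.any_nil,
    Bool.or_false, Bool.or_assoc]

lemma pvExt_empty (cur : Int × Int) (rem : PySem.Set (Int × Int)) (h : rem.isEmpty = true) :
    pvExt cur rem = true := by
  rw [pvExt, if_pos h]

lemma pvFoldlConsAny {α β : Type} (p : α → Bool) (g : α → β) (P : β → Bool) :
    ∀ (dirs : List α) (st : List β),
    ((dirs.foldl (fun s nb => if p nb then g nb :: s else s) st).any P)
      = (dirs.any (fun nb => p nb && P (g nb)) || st.any P) := by
  intro dirs
  induction dirs with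
  | nil => intro st; simp
  | cons d ds ih =>
    intro st
    simp only [List.foldl_cons, List.any_cons, ih]
    by_cases h : p d
    · simp only [h, if_true, List.any_cons, Bool.true_and]
      cases P (g d) <;> cases ds.any (fun nb => p nb && P (g nb)) <;> cases st.any P <;> rfl
    · simp [h]

lemma pvRun_eq_any : ∀ (st : List ((Int × Int) × PySem.Set (Int × Int))),
    pvRun st = st.any (fun q => pvExt q.1 q.2) := by
  intro st
  induction st using pvRun.induct with
  | case1 => simp [pvRun]
  | case2 cur rem st h =>
    rw [pvRun, if_pos h]
    simp [pvExt_empty _ _ h]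
  | case3 cur rem st h ih =>
    simp only [dite_eq_ite] at ih
    rw [pvRun, if_neg (by simp [h])]
    rw [ih, pvFoldlConsAny]
    simp only [List.any_cons]
    rw [pvExt_eq_any cur rem (by simpa using h)]
    simp [List.any_cons]

-- membership/length toolkit on the A side
lemma pvContainsDiff (s t : List (Int × Int)) (x : Int × Int) :
    PySem.Set.contains (PySem.Set.diff s t) x
      = (PySem.Set.contains s x && !(PySem.Set.contains t x)) := by
  rw [Bool.eq_iff_iff]
  simp [PySem.Set.mem_diff, Bool.and_eq_true, ← Bool.not_eq_true]

lemma pvContainsSingleton (nb a : Int × Int) :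
    PySem.Set.contains [nb] a = (a == nb) := by
  rw [Bool.eq_iff_iff]
  simp

lemma pvDiffAdd (s v : List (Int × Int)) (nb : Int × Int) :
    PySem.Set.diff s (PySem.Set.add v nb) = PySem.Set.diff (PySem.Set.diff s v) [nb] := by
  simp only [PySem.Set.diff, List.filter_filter]
  apply List.filter_congr
  intro a _
  have h1 : PySem.Set.contains (PySem.Set.add v nb) a
      = (PySem.Set.contains v a || a == nb) := by
    rw [Bool.eq_iff_iff]
    simp [PySem.Set.mem_add]
  rw [h1, pvContainsSingleton, Bool.not_or, Bool.and_comm]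

lemma pvLenBeq (s u : List (Int × Int)) (hs : s.Nodup) (hu : u.Nodup)
    (hsub : ∀ x ∈ u, x ∈ s) :
    (PySem.Set.len u == PySem.Set.len s) = (PySem.Set.diff s u).isEmpty := by
  have hperm : (s.filter (fun x => PySem.Set.contains u x)).Perm u := by
    rw [List.perm_ext_iff_of_nodup (hs.filter _) hu]
    intro a
    simp only [List.mem_filter, PySem.Set.contains_iff]
    exact ⟨fun h => h.2, fun h => ⟨hsub a h, h⟩⟩
  have hlen : (s.filter (fun x => PySem.Set.contains u x)).length = u.length :=
    hperm.length_eq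
  have hsplit : (s.filter (fun x => PySem.Set.contains u x)).length
      + (s.filter (fun x => !(PySem.Set.contains u x))).length = s.length := by
    simpa using (List.length_eq_length_filter_add (l := s)
      (f := fun x => PySem.Set.contains u x)).symm
  rw [Bool.eq_iff_iff]
  simp only [PySem.Set.len, beq_iff_eq, Int.natCast_inj, PySem.Set.diff,
    List.isEmpty_iff_length_eq_zero]
  omega

lemma pvAnyCongr {α : Type} {l : List α} {p q : α → Bool}
    (h : ∀ x ∈ l, p x = q x) : l.any p = l.any q := by
  induction l with
  | nil => rfl
  | cons x t ih =>
    simp only [List.any_cons, h x List.mem_cons_self,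
      ih fun y hy => h y (List.mem_cons_of_mem _ hy)]

-- the next_points loop builds the filter of the four candidate steps
lemma pvNextPoints (snake v : PySem.Set (Int × Int)) (dirs : List (Int × Int)) :
    (dirs.foldl (fun acc p =>
        if PySem.Set.contains snake p && !(PySem.Set.contains v p)
        then acc ++ [p] else acc) [])
      = dirs.filter (fun p => PySem.Set.contains (PySem.Set.diff snake v) p) := by
  have h := PySem.List.foldl_append_if
    (fun p => PySem.Set.contains snake p && !(PySem.Set.contains v p))
    (id : (Int × Int) → (Int × Int)) dirs []
  simp only [id_eq, List.map_id, List.nil_append] at h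
  rw [h]
  apply List.filter_congr
  intro a _
  exact (pvContainsDiff snake v a).symm

-- A's recursive search from `cur` with `visited` already on the path equals the
-- extension problem on the remaining cells, given enough fuel
lemma pvRecurEqExt (snake : PySem.Set (Int × Int)) (hs : List.Nodup snake) :
    ∀ (f : Nat) (cur : Int × Int) (visited : PySem.Set (Int × Int)),
      List.Nodup visited → (∀ x ∈ visited, x ∈ snake) → cur ∈ snake → cur ∉ visited →
      (PySem.Set.diff snake (PySem.Set.add visited cur)).length ≤ f →
      pvRecur snake (f + 1) cur visited
        = pvExt cur (PySem.Set.diff snake (PySem.Set.add visited cur)) := by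
  intro f
  induction f with
  | zero =>
    intro cur visited hv hsubv hcur hcv hb
    have hnil : PySem.Set.diff snake (PySem.Set.add visited cur) = [] :=
      List.eq_nil_of_length_eq_zero (Nat.le_zero.1 hb)
    have hv' : (PySem.Set.add visited cur).Nodup := PySem.Set.nodup_add _ _ hv
    have hsub' : ∀ x ∈ PySem.Set.add visited cur, x ∈ snake := by
      intro x hx
      rcases (PySem.Set.mem_add _ _ _).1 hx with h | rfl
      · exact hsubv x h
      · exact hcur
    have hlen' : (PySem.Set.len (PySem.Set.add visited cur) == PySem.Set.len snake) = true := by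
      rw [pvLenBeq snake _ hs hv' hsub', hnil]; rfl
    rw [pvRecur]
    simp only [hlen', if_true]
    rw [hnil]
    exact (pvExt_empty cur [] rfl).symm
  | succ f ih =>
    intro cur visited hv hsubv hcur hcv hb
    have hv' : (PySem.Set.add visited cur).Nodup := PySem.Set.nodup_add _ _ hv
    have hsub' : ∀ x ∈ PySem.Set.add visited cur, x ∈ snake := by
      intro x hx
      rcases (PySem.Set.mem_add _ _ _).1 hx with h | rfl
      · exact hsubv x h
      · exact hcur
    have hlb := pvLenBeq snake _ hs hv' hsub'
    rw [pvRecur]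
    simp only [hlb]
    by_cases hemp : (PySem.Set.diff snake (PySem.Set.add visited cur)).isEmpty
    · rw [if_pos hemp, pvExt_empty _ _ hemp]
    · rw [if_neg (by simp [hemp])]
      have hremE : (PySem.Set.diff snake (PySem.Set.add visited cur)).isEmpty = false := by
        simpa using hemp
      rw [pvNextPoints snake (PySem.Set.add visited cur), pvExt_eq_any cur _ hremE]
      by_cases hfe : ([(cur.1 + 1, cur.2), (cur.1 - 1, cur.2), (cur.1, cur.2 + 1),
          (cur.1, cur.2 - 1)].filter (fun p =>
            PySem.Set.contains (PySem.Set.diff snake (PySem.Set.add visited cur)) p)) = []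
      · rw [hfe]
        rw [List.filter_eq_nil_iff] at hfe
        simp only [List.length_nil, List.any_nil]
        rw [ite_self]
        symm
        rw [List.any_eq_false]
        intro x hx
        have hcx : PySem.Set.contains (PySem.Set.diff snake
            (PySem.Set.add visited cur)) x = false := by simpa using hfe x hx
        simp only [hcx, Bool.false_and]
        exact Bool.false_ne_true
      · rw [if_neg (by simpa [List.length_eq_zero_iff] using hfe)]
        rw [List.any_filter]
        have hfun : ∀ nb ∈ [(cur.1 + 1, cur.2), (cur.1 - 1, cur.2), (cur.1, cur.2 + 1),
            (cur.1, cur.2 - 1)],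
            (PySem.Set.contains (PySem.Set.diff snake (PySem.Set.add visited cur)) nb
              && pvRecur snake (f + 1) nb (PySem.Set.add visited cur))
            = (PySem.Set.contains (PySem.Set.diff snake (PySem.Set.add visited cur)) nb
              && pvExt nb (PySem.Set.diff (PySem.Set.diff snake
                  (PySem.Set.add visited cur)) [nb])) := by
          intro nb _
          by_cases hc : PySem.Set.contains (PySem.Set.diff snake (PySem.Set.add visited cur)) nb
          · rw [hc, Bool.true_and, Bool.true_and]
            have hnbmem : nb ∈ PySem.Set.diff snake (PySem.Set.add visited cur) :=
              (PySem.Set.contains_iff _ nb).1 hc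
            have hnbd := (PySem.Set.mem_diff _ _ nb).1 hnbmem
            have hchild : PySem.Set.diff snake (PySem.Set.add (PySem.Set.add visited cur) nb)
                = PySem.Set.diff (PySem.Set.diff snake (PySem.Set.add visited cur)) [nb] :=
              pvDiffAdd snake (PySem.Set.add visited cur) nb
            have hlt : (PySem.Set.diff (PySem.Set.diff snake (PySem.Set.add visited cur))
                [nb]).length < (PySem.Set.diff snake (PySem.Set.add visited cur)).length := by
              show (List.filter (fun x => !PySem.Set.contains [nb] x)
                  (PySem.Set.diff snake (PySem.Set.add visited cur))).length < _
              exact List.length_filter_lt_length_iff_exists.2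
                ⟨nb, hnbmem, by simp⟩
            rw [← hchild]
            exact ih nb (PySem.Set.add visited cur) hv' hsub' hnbd.1 hnbd.2
              (by rw [hchild]; omega)
          · have hc' : PySem.Set.contains (PySem.Set.diff snake
                (PySem.Set.add visited cur)) nb = false := by simpa using hc
            rw [hc', Bool.false_and, Bool.false_and]
        exact pvAnyCongr hfun

-- the A-side grid scan builds exactly set(B's point list)
lemma pvFoldlIfAdd {α β : Type} [BEq α] [LawfulBEq α] (l : List β) (c : β → Bool)
    (f : β → α) (s : PySem.Set α) :
    l.foldl (fun s q => if c q then PySem.Set.add s (f q) else s) s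
      = PySem.Set.update s ((l.filter c).map f) := by
  induction l generalizing s with
  | nil => simp [PySem.Set.update_nil]
  | cons q t ih =>
    by_cases h : c q = true
    · simp [List.foldl_cons, h, ih, PySem.Set.update_cons]
    · simp [List.foldl_cons, (by simpa using h : c q = false), ih]

lemma pvFoldlUpdate {α β : Type} [BEq α] [LawfulBEq α] (l : List β)
    (g : β → List α) (s : PySem.Set α) :
    l.foldl (fun s x => PySem.Set.update s (g x)) s
      = PySem.Set.update s (l.flatMap g) := by
  induction l generalizing s with
  | nil => simp [PySem.Set.update_nil]
  | cons x t ih => simp [List.foldl_cons, ih, PySem.Set.update_append]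

def pvRowPts (r : Int) (row : List String) : List (Int × Int) :=
  ((PySem.List.enumerate row).filter (fun cp => cp.2 == "S")).map (fun cp => (r, cp.1))

lemma pvSnakePointsEq (grid : List (List String)) :
    pvSnakePoints grid = PySem.Set.ofList (pvCollect grid) := by
  unfold pvSnakePoints pvCollect
  have e1 : PySem.List.enumerate grid = (PySem.List.pyRange 0 (grid.length : Int) 1).map
      (fun j => (j, PySem.List.pyGetD grid j ([] : List String))) := by
    simpa using PySem.List.enumerate_eq_map_pyRange (xs := grid) (d := ([] : List String))
  have e2 : ∀ (r : Int) (row : List String) (s : PySem.Set (Int × Int)),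
      (PySem.List.pyRange 0 (row.length : Int) 1).foldl (fun s c =>
          if PySem.List.pyGetD row c "" == "S" then PySem.Set.add s (r, c) else s) s
        = PySem.Set.update s (pvRowPts r row) := by
    intro r row s
    have er : PySem.List.enumerate row = (PySem.List.pyRange 0 (row.length : Int) 1).map
        (fun j => (j, PySem.List.pyGetD row j "")) := by
      simpa using PySem.List.enumerate_eq_map_pyRange (xs := row) (d := ("" : String))
    calc (PySem.List.pyRange 0 (row.length : Int) 1).foldl (fun s c =>
            if PySem.List.pyGetD row c "" == "S" then PySem.Set.add s (r, c) else s) s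
        = (PySem.List.enumerate row).foldl (fun s cp =>
            if cp.2 == "S" then PySem.Set.add s (r, cp.1) else s) s := by
          rw [er, List.foldl_map]
      _ = PySem.Set.update s (pvRowPts r row) :=
          pvFoldlIfAdd (PySem.List.enumerate row) (fun cp => cp.2 == "S") (fun cp => (r, cp.1)) s
  simp only [e2]
  calc (PySem.List.pyRange 0 (grid.length : Int) 1).foldl (fun s r =>
          PySem.Set.update s (pvRowPts r (PySem.List.pyGetD grid r []))) PySem.Set.empty
      = (PySem.List.enumerate grid).foldl (fun s rp =>
          PySem.Set.update s (pvRowPts rp.1 rp.2)) PySem.Set.empty := by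
        rw [e1, List.foldl_map]
    _ = PySem.Set.update PySem.Set.empty ((PySem.List.enumerate grid).flatMap
          (fun rp => pvRowPts rp.1 rp.2)) :=
        pvFoldlUpdate (PySem.List.enumerate grid) (fun rp => pvRowPts rp.1 rp.2) PySem.Set.empty
    _ = PySem.Set.ofList ((PySem.List.enumerate grid).flatMap (fun rp =>
          ((PySem.List.enumerate rp.2).filter (fun cp => cp.2 == "S")).map
            (fun cp => (rp.1, cp.1)))) := by
        exact PySem.Set.update_nil_left _

lemma pvCollectNodup (grid : List (List String)) : (pvCollect grid).Nodup := by
  unfold pvCollect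
  rw [List.nodup_flatMap]
  constructor
  · intro rp _
    have hp : (PySem.List.enumerate rp.2).Pairwise (fun p q => p.1 < q.1) :=
      PySem.List.pairwise_lt_enumerate _ _
    have hf : ((PySem.List.enumerate rp.2).filter (fun cp => cp.2 == "S")).Pairwise
        (fun p q => p.1 < q.1) := hp.filter _
    exact hf.map _ (fun a b hlt he => by
      injection he with h1 h2
      omega)
  · have hp : (PySem.List.enumerate grid).Pairwise (fun p q => p.1 < q.1) :=
      PySem.List.pairwise_lt_enumerate _ _
    refine hp.imp ?_
    intro a b hlt x hx1 hx2
    rcases List.mem_map.1 hx1 with ⟨c1, _, rfl⟩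
    rcases List.mem_map.1 hx2 with ⟨c2, _, he⟩
    injection he with h1 h2
    omega

-- ===== VERDICT (by name: the statement is the Claim_ definition above) =====
theorem is_valid_snake_spec : Claim_equal_is_valid_snake := by
  intro grid _
  unfold Spec_is_valid_snake is_valid_snake is_valid_snake_alt
  have hnd := pvCollectNodup grid
  have hself : PySem.Set.ofList (pvCollect grid) = pvCollect grid :=
    PySem.Set.ofList_eq_self_of_nodup _ hnd
  have hpts : pvSnakePoints grid = pvCollect grid := by
    rw [pvSnakePointsEq, hself]
  simp only [hpts, hself, pvRun_eq_any, List.any_reverse, List.any_map]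
  refine pvAnyCongr ?_
  intro p hp
  have hpos : 0 < (pvCollect grid).length := List.length_pos_of_mem hp
  have hadd : PySem.Set.add PySem.Set.empty p = [p] := by
    simp [PySem.Set.add, PySem.Set.empty, PySem.Set.contains]
  have hlt : (PySem.Set.diff (pvCollect grid) [p]).length < (pvCollect grid).length := by
    simp only [PySem.Set.diff]
    exact List.length_filter_lt_length_iff_exists.2
      ⟨p, hp, by simp⟩
  have he : (pvCollect grid).length = ((pvCollect grid).length - 1) + 1 := by omega
  rw [he, pvRecurEqExt _ hnd _ p PySem.Set.empty List.nodup_nil (by simp) hp (by simp)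
    (by rw [hadd]; omega)]
  rw [hadd]
  rfl
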